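-- pv_equiv track=rewrite | github.com/unpingable/atproto-feeds | receipts_feed/domains.py | is_platform_domain
-- ===== SOURCE A (Python) =====
-- PLATFORM_DOMAINS: set[str] = {
--     "bsky.app",
--     "bsky.social",
--     "staging.bsky.app",
--     "twitter.com",
--     "x.com",
--     "threads.net",
--     "facebook.com",
--     "instagram.com",
--     "tiktok.com",
--     "reddit.com",
--     "t.co",
--     "bit.ly",
--     "linktr.ee",
-- }
--
-- def is_platform_domain(domain: str | None) -> bool:
--     """Return True if domain is a social platform / self-reference, not a real source."""
--     if not domain:
--         return False
--     domain = domain.lower().strip()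
--     if domain in PLATFORM_DOMAINS:
--         return True
--     for d in PLATFORM_DOMAINS:
--         if domain.endswith("." + d):
--             return True
--     return False
-- ===== SOURCE B (Python) =====
-- PLATFORM_DOMAINS: set[str] = {
--     "bsky.app",
--     "bsky.social",
--     "staging.bsky.app",
--     "twitter.com",
--     "x.com",
--     "threads.net",
--     "facebook.com",
--     "instagram.com",
--     "tiktok.com",
--     "reddit.com",
--     "t.co",
--     "bit.ly",
--     "linktr.ee",
-- }
--
-- def is_platform_domain(domain: str | None) -> bool:
--     """Return True if domain is a social platform / self-reference, not a real source."""
--     if not domain: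
--         return False
--     d = domain.lower().strip()
--     suffixes = [d] + [d[i + 1:] for i, ch in enumerate(d) if ch == '.']
--     return any(s in PLATFORM_DOMAINS for s in suffixes)
-- ===== Notes on version B (the rewrite author's own statement) =====
-- stated objective: alternative
-- what changed: Instead of iterating the platform set and testing each entry as a dot-prefixed suffix of the domain, B builds the domain's own dot-boundary suffix candidates once (the whole string plus the remainder after each dot) and looks each up in the set.
import Mathlib
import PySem

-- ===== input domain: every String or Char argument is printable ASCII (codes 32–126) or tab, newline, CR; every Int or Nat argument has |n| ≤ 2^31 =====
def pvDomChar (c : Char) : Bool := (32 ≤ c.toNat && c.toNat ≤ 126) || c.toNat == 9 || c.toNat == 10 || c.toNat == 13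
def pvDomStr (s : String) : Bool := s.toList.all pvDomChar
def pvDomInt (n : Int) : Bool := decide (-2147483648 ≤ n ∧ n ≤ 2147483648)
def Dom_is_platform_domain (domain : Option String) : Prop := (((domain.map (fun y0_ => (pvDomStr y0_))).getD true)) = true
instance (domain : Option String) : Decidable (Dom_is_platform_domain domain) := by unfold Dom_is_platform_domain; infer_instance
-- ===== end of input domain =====

-- B replaces A's scan of the platform set with endswith by building the input's own dot-boundary
-- suffixes once and looking each up in the set (alternative decomposition; same cost at this size).


-- ===== PORT A =====
-- PLATFORM_DOMAINS (a Python set of distinct literals; A only tests membership and any-endswith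
-- over it, both order-independent, so a list of the distinct elements is exact)
def platformDomains : List (List Char) :=
  ["bsky.app".toList, "bsky.social".toList, "staging.bsky.app".toList, "twitter.com".toList,
   "x.com".toList, "threads.net".toList, "facebook.com".toList, "instagram.com".toList,
   "tiktok.com".toList, "reddit.com".toList, "t.co".toList, "bit.ly".toList, "linktr.ee".toList]

def is_platform_domain (domain : Option String) : Bool :=
  match domain with
  | none => false               -- 'if not domain': None is falsy
  | some s =>
    if s = "" then false        -- '' is falsy
    else
      let d := PySem.Chars.strip (PySem.Chars.lower s.toList)
      if platformDomains.contains d then true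
      else
        -- 'for d in PLATFORM_DOMAINS: if domain.endswith("." + d): return True' / 'return False'
        platformDomains.any (fun p => PySem.Chars.endswith d ('.' :: p))

-- ===== PORT B =====
def is_platform_domain_alt (domain : Option String) : Bool :=
  match domain with
  | none => false
  | some s =>
    if s = "" then false
    else
      let d := PySem.Chars.strip (PySem.Chars.lower s.toList)
      -- suffixes = [d] + [d[i+1:] for i, ch in enumerate(d) if ch == '.']
      let suffixes := [d] ++
        ((PySem.List.enumerate d).filter (fun q => q.2 == '.')).map
          (fun q => PySem.List.slice d (some (q.1 + 1)) none)
      -- any(s in PLATFORM_DOMAINS for s in suffixes)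
      suffixes.any (fun t => platformDomains.contains t)

-- ===== PRECONDITION & SPEC =====
def Spec_is_platform_domain (domain : Option String) (out : Bool) : Prop := out = is_platform_domain_alt domain
instance (domain : Option String) (out : Bool) : Decidable (Spec_is_platform_domain domain out) := by unfold Spec_is_platform_domain; infer_instance

-- ===== CLAIM (what is proved, stated in full; the proofs are below) =====
def Claim_equal_is_platform_domain : Prop := ∀ (domain : Option String), Dom_is_platform_domain domain → Spec_is_platform_domain domain (is_platform_domain domain)

-- ===== LEMMAS AND PROOFS =====

-- '.'::p is a suffix of d exactly when p is the remainder of d after some dot.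
theorem dot_suffix_iff (d p : List Char) :
    ('.' :: p <:+ d) ↔ ∃ k, ∃ _ : k < d.length, d[k] = '.' ∧ d.drop (k + 1) = p := by
  constructor
  · rintro ⟨t, rfl⟩
    refine ⟨t.length, by simp, by simp, ?_⟩
    simp [List.drop_length_add_append]
  · rintro ⟨k, hk, hdot, hdrop⟩
    have h1 : d.drop k = '.' :: p := by
      rw [List.drop_eq_getElem_cons hk, hdot, hdrop]
    rw [← h1]
    exact List.drop_suffix k d

-- the any-endswith scan of the set equals the any-membership scan of the dot suffixes
theorem scan_eq (P : List (List Char)) (d : List Char) :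
    P.any (fun p => PySem.Chars.endswith d ('.' :: p)) =
      (((PySem.List.enumerate d).filter (fun q => q.2 == '.')).map
        (fun q => PySem.List.slice d (some (q.1 + 1)) none)).any (fun t => P.contains t) := by
  apply Bool.eq_iff_iff.mpr
  simp only [List.any_eq_true, List.mem_map, List.mem_filter,
    PySem.Chars.endswith_iff, PySem.List.mem_enumerate_iff, List.contains_eq_mem,
    decide_eq_true_eq, beq_iff_eq]
  constructor
  · rintro ⟨p, hp, hsuf⟩
    rcases (dot_suffix_iff d p).mp hsuf with ⟨k, hk, hdot, hdrop⟩
    refine ⟨d.drop (k + 1), ⟨((k : Int), d[k]), ⟨⟨k, hk, by simp⟩, hdot⟩, ?_⟩, hdrop ▸ hp⟩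
    rw [PySem.List.slice_from d (a := (k : Int) + 1) (by positivity)]
    norm_num
  · rintro ⟨t, ⟨q, ⟨⟨k, hk, hqk⟩, hc⟩, hslice⟩, hmem⟩
    subst hqk
    simp only at hc
    have hsl : PySem.List.slice d (some ((0 : Int) + (k : Int) + 1)) none = d.drop (k + 1) := by
      rw [PySem.List.slice_from d (a := (0 : Int) + (k : Int) + 1) (by positivity)]
      norm_num
    refine ⟨t, hmem, ?_⟩
    rw [← hslice]
    simp only [hsl]
    exact (dot_suffix_iff d _).mpr ⟨k, hk, hc, rfl⟩

-- ===== VERDICT (by name: the statement is the Claim_ definition above) =====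
theorem is_platform_domain_spec : Claim_equal_is_platform_domain := by
  intro domain _
  unfold Spec_is_platform_domain
  cases domain with
  | none => rfl
  | some s =>
    by_cases hs : s = ""
    · simp [is_platform_domain, is_platform_domain_alt, hs]
    · simp only [is_platform_domain, is_platform_domain_alt, if_neg hs]
      set d := PySem.Chars.strip (PySem.Chars.lower s.toList) with hd
      by_cases hc : d ∈ platformDomains
      · simp [hc, List.contains_eq_mem]
      · simp only [List.contains_eq_mem, hc, decide_false, Bool.false_eq_true, if_false,
          List.any_append, List.any_cons, List.any_nil, Bool.or_false, Bool.false_or]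
        rw [scan_eq]
        simp [List.contains_eq_mem]
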